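-- pv_equiv track=rewrite | github.com/MartinStoller/Nim_AI_Challenge | textinput_nim.py | check_validity_line
-- ===== SOURCE A (Python) =====
-- def check_validity_line(textinput, piles):
--     """
--     :param textinput: detected textinput
--     :param piles: list of available blocks (at the beginning of game [1, 3, 5, 7])
--     :return: True if input is valid, False otherwise
--     """
--     # Check if input can be converted to int:
--     try:
--         textinput = int(textinput)
--     except:
--         return False
--     # get valid inputs and check if actual input is part of that.
--     valid_inputs = []
--     for e in enumerate(piles):
--         if e[1] != 0:
--             valid_inputs.append(e[0])
--
--     if textinput not in valid_inputs:
--         return False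
--     return True
-- ===== SOURCE B (Python) =====
-- def check_validity_line(textinput, piles):
--     """
--     :param textinput: detected textinput
--     :param piles: list of available blocks (at the beginning of game [1, 3, 5, 7])
--     :return: True if input is valid, False otherwise
--     """
--     try:
--         textinput = int(textinput)
--     except ValueError:
--         return False
--     return 0 <= textinput < len(piles) and piles[textinput] != 0
-- ===== Notes on version B (the rewrite author's own statement) =====
-- stated objective: simpler
-- what changed: Replaces A's build-a-list-of-valid-indices-then-membership-scan with a direct bounds check followed by a single constant-time lookup of that one pile.
import Mathlib
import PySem

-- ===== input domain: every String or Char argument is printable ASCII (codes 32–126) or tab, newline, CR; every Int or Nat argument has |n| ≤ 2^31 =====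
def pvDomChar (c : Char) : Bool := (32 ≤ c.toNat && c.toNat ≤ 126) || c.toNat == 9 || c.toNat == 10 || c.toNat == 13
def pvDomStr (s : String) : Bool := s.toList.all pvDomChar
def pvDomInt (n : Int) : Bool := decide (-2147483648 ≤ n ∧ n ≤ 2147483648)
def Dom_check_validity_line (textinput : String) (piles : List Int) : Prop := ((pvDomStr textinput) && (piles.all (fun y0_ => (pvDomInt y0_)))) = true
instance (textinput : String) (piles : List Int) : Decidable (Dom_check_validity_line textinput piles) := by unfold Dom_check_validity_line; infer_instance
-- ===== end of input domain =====

-- B replaces A's build-a-list-of-valid-indices-then-membership-scan with a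
-- direct bounds check plus one indexed lookup (objective: simpler).


-- ===== PORT A =====
def check_validity_line (textinput : String) (piles : List Int) : Bool :=
  match PySem.Int.ofStr? textinput with
  | none => false
  | some n =>
    let valid_inputs : List Int :=
      (PySem.List.enumerate piles).foldl
        (fun acc e => if e.2 ≠ 0 then acc ++ [e.1] else acc) []
    if n ∉ valid_inputs then false else true

-- ===== PORT B =====
def check_validity_line_alt (textinput : String) (piles : List Int) : Bool :=
  match PySem.Int.ofStr? textinput with
  | none => false
  | some n =>
    decide (0 ≤ n) && decide (n < (piles.length : Int)) &&
      decide (PySem.List.pyGetD piles n 0 ≠ 0)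

-- ===== PRECONDITION & SPEC =====
def Spec_check_validity_line (textinput : String) (piles : List Int) (out : Bool) : Prop := out = check_validity_line_alt textinput piles
instance (textinput : String) (piles : List Int) (out : Bool) : Decidable (Spec_check_validity_line textinput piles out) := by unfold Spec_check_validity_line; infer_instance

-- ===== CLAIM (what is proved, stated in full; the proofs are below) =====
def Claim_equal_check_validity_line : Prop := ∀ (textinput : String) (piles : List Int), Dom_check_validity_line textinput piles → Spec_check_validity_line textinput piles (check_validity_line textinput piles)

-- ===== LEMMAS AND PROOFS =====

theorem pv_foldl_acc (piles : List Int) (s : Int) (acc : List Int) :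
    (PySem.List.enumerate piles s).foldl
      (fun acc e => if e.2 ≠ 0 then acc ++ [e.1] else acc) acc
    = acc ++ (PySem.List.enumerate piles s).foldl
      (fun acc e => if e.2 ≠ 0 then acc ++ [e.1] else acc) [] := by
  induction piles generalizing s acc with
  | nil => simp [PySem.List.enumerate_nil]
  | cons x xs ih =>
    simp only [PySem.List.enumerate_cons, List.foldl_cons]
    by_cases hx : x ≠ 0
    · rw [if_pos hx, if_pos hx, ih (s+1) (acc ++ [s]), ih (s+1) ([] ++ [s])]
      simp
    · rw [if_neg hx, if_neg hx, ih (s+1) acc]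

theorem pv_mem_valid (piles : List Int) (s n : Int) :
    (n ∈ (PySem.List.enumerate piles s).foldl
        (fun acc e => if e.2 ≠ 0 then acc ++ [e.1] else acc) [])
    ↔ ∃ k : Nat, k < piles.length ∧ n = s + k ∧ piles.getD k 0 ≠ 0 := by
  induction piles generalizing s with
  | nil => simp [PySem.List.enumerate_nil]
  | cons x xs ih =>
    simp only [PySem.List.enumerate_cons, List.foldl_cons]
    by_cases hx : x ≠ 0
    · rw [if_pos hx, pv_foldl_acc, List.mem_append, ih (s+1)]
      constructor
      · rintro (h | ⟨k, hk, rfl, hne⟩)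
        · simp at h
          exact ⟨0, by simp, by simpa using h, by simpa using hx⟩
        · exact ⟨k + 1, by simpa using hk, by push_cast; ring, by simpa using hne⟩
      · rintro ⟨k, hk, rfl, hne⟩
        cases k with
        | zero => left; simp
        | succ k =>
          right
          exact ⟨k, by simpa using hk, by push_cast; ring, by simpa using hne⟩
    · rw [if_neg hx, ih (s+1)]
      push_neg at hx
      constructor
      · rintro ⟨k, hk, rfl, hne⟩
        exact ⟨k + 1, by simpa using hk, by push_cast; ring, by simpa using hne⟩
      · rintro ⟨k, hk, rfl, hne⟩
        cases k with
        | zero => simp [hx] at hne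
        | succ k =>
          exact ⟨k, by simpa using hk, by push_cast; ring, by simpa using hne⟩

-- ===== VERDICT (by name: the statement is the Claim_ definition above) =====
theorem check_validity_line_spec : Claim_equal_check_validity_line := by
  intro textinput piles _
  unfold Spec_check_validity_line check_validity_line check_validity_line_alt
  cases h : PySem.Int.ofStr? textinput with
  | none => rfl
  | some n =>
    simp only []
    have key : (n ∈ (PySem.List.enumerate piles 0).foldl
        (fun acc e => if e.2 ≠ 0 then acc ++ [e.1] else acc) [])
        ↔ ∃ k : Nat, k < piles.length ∧ n = (k : Int) ∧ piles.getD k 0 ≠ 0 := by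
      simpa using pv_mem_valid piles 0 n
    by_cases hmem : n ∈ (PySem.List.enumerate piles 0).foldl
        (fun acc e => if e.2 ≠ 0 then acc ++ [e.1] else acc) []
    · rw [if_neg (by simpa using hmem)]
      obtain ⟨k, hk, rfl, hne⟩ := key.mp hmem
      have hne' : piles[k] ≠ 0 := by rwa [List.getD_eq_getElem _ _ hk] at hne
      simp [hk, hne']
    · rw [if_pos (by simpa using hmem)]
      rw [key] at hmem
      push_neg at hmem
      by_cases h1 : 0 ≤ n
      · by_cases h2 : n < (piles.length : Int)
        · have hk : n.toNat < piles.length := by omega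
          have hz := hmem n.toNat hk (by omega)
          have hget : PySem.List.pyGetD piles n 0 = piles.getD n.toNat 0 := by
            have hnn : n = ((n.toNat : Nat) : Int) := by omega
            rw [hnn, PySem.List.pyGetD_natCast]
            congr 1
          have hz' : piles[n.toNat] = 0 := by rwa [List.getD_eq_getElem _ _ hk] at hz
          simp [h1, h2, hget, hz']
        · simp [h2]
      · simp [h1]
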